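-- pv_equiv track=rewrite | github.com/phamminhanhdhbk/Basic-Python-2023-100-example- | Month 5/Exercise 12 Nhập vào một list L có các phần tử là chuỗi.  Hãy tìm ra chuỗi có vị trí ký tự in hoa lớn nhất/index.py | find_string_with_highest_uppercase
-- ===== SOURCE A (Python) =====
-- def find_string_with_highest_uppercase(L):
--     highest_position = -1
--     result_string = None
--
--     for string in L:
--         for i, char in enumerate(string):
--             if char.isupper() and i > highest_position:
--                 highest_position = i
--                 result_string = string
--
--     return result_string
-- ===== SOURCE B (Python) =====
-- def find_string_with_highest_uppercase(L):
--     highest_position = -1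
--     result_string = None
--     for string in L:
--         # scan only indices strictly above the current best, from the end;
--         # the first uppercase found is this string's highest uppercase index
--         for i in range(len(string) - 1, highest_position, -1):
--             if string[i].isupper():
--                 highest_position = i
--                 result_string = string
--                 break
--     return result_string
-- ===== Notes on version B (the rewrite author's own statement) =====
-- stated objective: alternative
-- what changed: Replaces A's full left-to-right scan of every character with incremental max-tracking by a reverse scan per string that breaks at the first uppercase found and is pruned to indices strictly above the current best, so most characters are never examined.
import Mathlib
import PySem

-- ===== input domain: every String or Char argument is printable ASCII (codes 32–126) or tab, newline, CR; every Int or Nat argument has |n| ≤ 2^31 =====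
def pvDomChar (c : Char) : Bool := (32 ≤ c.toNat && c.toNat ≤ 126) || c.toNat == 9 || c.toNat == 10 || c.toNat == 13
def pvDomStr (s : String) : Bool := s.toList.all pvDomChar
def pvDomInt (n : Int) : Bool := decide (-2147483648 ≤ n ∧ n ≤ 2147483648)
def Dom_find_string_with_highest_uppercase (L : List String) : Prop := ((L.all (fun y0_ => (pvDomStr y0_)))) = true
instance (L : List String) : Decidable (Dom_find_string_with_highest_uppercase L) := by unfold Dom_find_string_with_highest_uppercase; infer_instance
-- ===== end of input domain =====

-- B replaces A's full left-to-right scan with a per-string reverse scan that breaks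
-- at the first uppercase and only visits indices above the current best (objective: alternative).


-- ===== PORT A =====
-- literal port: fold over the strings, inner fold over enumerate(string)
def find_string_with_highest_uppercase (L : List String) : Option String :=
  (L.foldl
    (fun (st : Int × Option String) (s : String) =>
      (PySem.List.enumerate s.toList 0).foldl
        (fun st p =>
          if PySem.Chars.isupper p.2 && decide (st.1 < p.1) then (p.1, some s) else st)
        st)
    (-1, none)).2

-- ===== PORT B =====
-- first index in idxs whose character is uppercase (= the reverse scan with break);
-- pyGet? is exact Python indexing — the `none` arm is unreachable for in-range idxs
def pvFindUp (s : List Char) : List Int → Option Int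
  | [] => none
  | i :: rest =>
    match PySem.List.pyGet? s i with
    | some c => if PySem.Chars.isupper c then some i else pvFindUp s rest
    | none => pvFindUp s rest

def find_string_with_highest_uppercase_alt (L : List String) : Option String :=
  (L.foldl
    (fun (st : Int × Option String) (s : String) =>
      match pvFindUp s.toList (PySem.List.pyRange ((s.toList.length : Int) - 1) st.1 (-1)) with
      | some i => (i, some s)
      | none => st)
    (-1, none)).2

-- ===== PRECONDITION & SPEC =====
def Spec_find_string_with_highest_uppercase (L : List String) (out : Option String) : Prop := out = find_string_with_highest_uppercase_alt L
instance (L : List String) (out : Option String) : Decidable (Spec_find_string_with_highest_uppercase L out) := by unfold Spec_find_string_with_highest_uppercase; infer_instance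

-- ===== CLAIM (what is proved, stated in full; the proofs are below) =====
def Claim_equal_find_string_with_highest_uppercase : Prop := ∀ (L : List String), Dom_find_string_with_highest_uppercase L → Spec_find_string_with_highest_uppercase L (find_string_with_highest_uppercase L)

-- ===== LEMMAS AND PROOFS =====

-- pvFindUp only returns a member of the index list
theorem pvFindUp_mem (s : List Char) (idxs : List Int) (i : Int)
    (h : pvFindUp s idxs = some i) : i ∈ idxs := by
  induction idxs with
  | nil => simp [pvFindUp] at h
  | cons j rest ih =>
    simp only [pvFindUp] at h
    cases hg : PySem.List.pyGet? s j with
    | none => simp [hg] at h; exact List.mem_cons_of_mem _ (ih h)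
    | some c =>
      simp [hg] at h
      by_cases hu : PySem.Chars.isupper c = true
      · simp [hu] at h; simp [h]
      · simp [hu] at h; exact List.mem_cons_of_mem _ (ih h)

-- appending a character does not change pvFindUp on indices below the old length
theorem pvFindUp_append (l : List Char) (c : Char) (idxs : List Int)
    (h : ∀ i ∈ idxs, 0 ≤ i ∧ i < (l.length : Int)) :
    pvFindUp (l ++ [c]) idxs = pvFindUp l idxs := by
  induction idxs with
  | nil => rfl
  | cons j rest ih =>
    have hj := h j (List.mem_cons_self)
    have hrest : ∀ i ∈ rest, 0 ≤ i ∧ i < (l.length : Int) :=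
      fun i hi => h i (List.mem_cons_of_mem _ hi)
    have hget : PySem.List.pyGet? (l ++ [c]) j = PySem.List.pyGet? l j := by
      rw [PySem.List.pyGet?_of_nonneg _ hj.1, PySem.List.pyGet?_of_nonneg _ hj.1]
      have hlt : j.toNat < l.length := by omega
      rw [List.getElem?_append_left hlt]
    simp only [pvFindUp, hget, ih hrest]

-- key per-string lemma: A's left-to-right inner fold equals B's pruned reverse scan
theorem inner_eq (s : String) (l : List Char) :
    ∀ (st : Int × Option String), -1 ≤ st.1 →
    (PySem.List.enumerate l 0).foldl
        (fun st p =>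
          if PySem.Chars.isupper p.2 && decide (st.1 < p.1) then (p.1, some s) else st)
        st
    = match pvFindUp l (PySem.List.pyRange ((l.length : Int) - 1) st.1 (-1)) with
      | some i => (i, some s)
      | none => st := by
  induction l using List.reverseRecOn with
  | nil =>
    intro st hst
    rw [PySem.List.pyRange_neg_one_eq_nil (by simpa using hst)]
    simp [PySem.List.enumerate, pvFindUp]
  | append_singleton l c ih =>
    intro st hst
    rw [PySem.List.enumerate_append]
    rw [List.foldl_append]
    simp only [PySem.List.enumerate_cons, PySem.List.enumerate_nil]
    have hlen : ((l ++ [c]).length : Int) - 1 = (l.length : Int) := by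
      simp
    rw [hlen]
    by_cases hbig : (l.length : Int) ≤ st.1
    · -- the range is empty, and no index can beat st.1
      rw [PySem.List.pyRange_neg_one_eq_nil hbig]
      have hih := ih st hst
      rw [PySem.List.pyRange_neg_one_eq_nil (by omega)] at hih
      simp only [pvFindUp] at hih ⊢
      rw [hih, List.foldl_cons, List.foldl_nil]
      split_ifs with h
      · simp only [Bool.and_eq_true, decide_eq_true_eq] at h
        omega
      · rfl
    · rw [not_le] at hbig
      rw [PySem.List.pyRange_neg_one_cons hbig]
      simp only [pvFindUp]
      have hgetc : PySem.List.pyGet? (l ++ [c]) (l.length : Int) = some c :=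
        PySem.List.pyGet?_append_length (pre := l) (y := c) (ys := [])
      rw [hgetc]
      rw [ih st hst]
      by_cases hu : PySem.Chars.isupper c = true
      · -- uppercase at the top index wins on both sides
        simp only [hu, if_pos]
        cases hfu : pvFindUp l (PySem.List.pyRange ((l.length : Int) - 1) st.1 (-1)) with
        | none =>
          simp only [List.foldl_cons, List.foldl_nil]
          rw [if_pos]
          · simp
          · simp only [hu, Bool.true_and, decide_eq_true_eq]
            omega
        | some i =>
          have hi := pvFindUp_mem _ _ _ hfu
          rw [PySem.List.mem_pyRange_neg_one] at hi
          simp only [List.foldl_cons, List.foldl_nil]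
          rw [if_pos]
          · simp
          · simp only [hu, Bool.true_and, decide_eq_true_eq]
            omega
      · -- not uppercase: both sides skip the last character
        simp only [hu]
        have hmem : ∀ i ∈ PySem.List.pyRange ((l.length : Int) - 1) st.1 (-1),
            0 ≤ i ∧ i < (l.length : Int) := by
          intro i hi
          rw [PySem.List.mem_pyRange_neg_one] at hi
          omega
        rw [pvFindUp_append l c _ hmem]
        cases hfu : pvFindUp l (PySem.List.pyRange ((l.length : Int) - 1) st.1 (-1)) with
        | none =>
          simp only [List.foldl_cons, List.foldl_nil]
          simp [hu]
        | some i =>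
          simp only [List.foldl_cons, List.foldl_nil]
          simp [hu]

-- the outer folds agree, given the invariant -1 ≤ best
theorem outer_eq (L : List String) :
    ∀ (st : Int × Option String), -1 ≤ st.1 →
    L.foldl
      (fun (st : Int × Option String) (s : String) =>
        (PySem.List.enumerate s.toList 0).foldl
          (fun st p =>
            if PySem.Chars.isupper p.2 && decide (st.1 < p.1) then (p.1, some s) else st)
          st)
      st
    = L.foldl
      (fun (st : Int × Option String) (s : String) =>
        match pvFindUp s.toList (PySem.List.pyRange ((s.toList.length : Int) - 1) st.1 (-1)) with
        | some i => (i, some s)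
        | none => st)
      st := by
  induction L with
  | nil => intro st _; rfl
  | cons s rest ih =>
    intro st hst
    simp only [List.foldl_cons]
    rw [inner_eq s s.toList st hst]
    cases hfu : pvFindUp s.toList (PySem.List.pyRange ((s.toList.length : Int) - 1) st.1 (-1)) with
    | none => exact ih st hst
    | some i =>
      have hi := pvFindUp_mem _ _ _ hfu
      rw [PySem.List.mem_pyRange_neg_one] at hi
      exact ih (i, some s) (by simp; omega)

-- ===== VERDICT (by name: the statement is the Claim_ definition above) =====
theorem find_string_with_highest_uppercase_spec : Claim_equal_find_string_with_highest_uppercase := by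
  intro L _
  unfold Spec_find_string_with_highest_uppercase
  unfold find_string_with_highest_uppercase find_string_with_highest_uppercase_alt
  rw [outer_eq L (-1, none) (by norm_num)]
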